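-- pv_equiv track=rewrite | github.com/bialimed/AnaCore-utils | bin/mergeCoOccurVar.py | getReadRefAlt
-- ===== SOURCE A (Python) =====
-- def getReadRefAlt(ref_aln, read_aln, ref_start, target_is_ins, target_start, target_end):
--     """
--     Return reference sequence and read sequence for the selected target.
--
--     :param ref_aln: Reference sequence in alignment.
--     :type ref_aln: str
--     :param read_aln: Read sequence in alignment.
--     :type read_aln: str
--     :param ref_start: Start position for the alignment on the reference (1-based).
--     :type ref_start: int
--     :param target_is_ins: The anlyzed target correspond to an exon.
--     :type target_is_ins: bool
--     :param target_start: Start reference position for the target (1-based).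
--     :type target_start: int
--     :param target_end: End reference position for the target (1-based).
--     :type target_end: int
--     :return: Reference and alternative sequence for the read.
--     :rtype: (str, str)
--     """
--     alt = read_aln[target_start - ref_start:target_end - ref_start + 1]
--     ref = ref_aln[target_start - ref_start:target_end - ref_start + 1]
--     if target_is_ins:
--         while len(ref[0]) > 0 and len(alt[0]) > 0 and alt[0][0] == ref[0][0]:
--             alt[0] = alt[0][1:]
--             ref[0] = ref[0][1:]
--     return ref, alt
-- ===== SOURCE B (Python) =====
-- def getReadRefAlt(ref_aln, read_aln, ref_start, target_is_ins, target_start, target_end):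
--     lo = target_start - ref_start
--     hi = target_end - ref_start + 1
--     ref = ref_aln[lo:hi]
--     alt = read_aln[lo:hi]
--     if not target_is_ins:
--         return ref, alt
--     r0 = ref[0]
--     if not r0:
--         # nothing to trim when the first reference piece is empty
--         return ref, alt
--     a0 = alt[0]
--     L = 0
--     for c, d in zip(r0, a0):
--         if c != d:
--             break
--         L += 1
--     return [r0[L:]] + ref[1:], [a0[L:]] + alt[1:]
-- ===== Notes on version B (the rewrite author's own statement) =====
-- stated objective: simpler
-- what changed: Instead of A's while loop that repeatedly re-slices and reassigns ref[0]/alt[0] one character at a time, B counts the common prefix length L in one zip pass and builds the result lists fresh as [piece[L:]] + rest, with early returns and no in-place mutation.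
import Mathlib
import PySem

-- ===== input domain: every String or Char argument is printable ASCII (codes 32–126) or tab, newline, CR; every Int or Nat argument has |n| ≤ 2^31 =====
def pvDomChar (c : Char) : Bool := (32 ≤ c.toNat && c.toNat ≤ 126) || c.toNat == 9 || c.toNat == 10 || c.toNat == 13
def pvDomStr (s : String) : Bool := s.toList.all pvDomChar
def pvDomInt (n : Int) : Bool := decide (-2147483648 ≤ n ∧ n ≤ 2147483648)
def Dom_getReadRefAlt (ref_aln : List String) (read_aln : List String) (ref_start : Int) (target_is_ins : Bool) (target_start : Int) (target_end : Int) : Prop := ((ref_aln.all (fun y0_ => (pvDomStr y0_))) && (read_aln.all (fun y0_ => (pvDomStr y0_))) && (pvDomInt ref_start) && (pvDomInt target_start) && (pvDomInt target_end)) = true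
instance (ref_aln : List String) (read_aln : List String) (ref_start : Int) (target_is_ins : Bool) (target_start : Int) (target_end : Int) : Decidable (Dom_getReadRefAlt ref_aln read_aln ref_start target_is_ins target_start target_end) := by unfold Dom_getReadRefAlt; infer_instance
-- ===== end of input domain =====

-- B replaces A's while loop (which re-slices and reassigns ref[0]/alt[0] one character per
-- iteration) by one zip pass counting the common prefix length and a fresh [piece[L:]] + rest
-- list build with early returns (objective: simpler).

-- ===== PORT A =====
-- `lst[0] = s` on a Python list, as the pure update of the head (Pre_ guarantees nonempty
-- where Python would otherwise raise).
def pvSetHead (l : List String) (s : String) : List String :=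
  match l with
  | [] => []
  | _ :: t => s :: t

-- A's while loop: while len(ref0)>0 and len(alt0)>0 and alt0[0]==ref0[0]: drop both heads.
def pvTrimA : List Char → List Char → List Char × List Char
  | c :: r, d :: a => if d = c then pvTrimA r a else (c :: r, d :: a)
  | r, a => (r, a)

def getReadRefAlt (ref_aln : List String) (read_aln : List String) (ref_start : Int) (target_is_ins : Bool) (target_start : Int) (target_end : Int) : List String × List String :=
  let alt := PySem.List.slice read_aln (some (target_start - ref_start)) (some (target_end - ref_start + 1))
  let ref := PySem.List.slice ref_aln (some (target_start - ref_start)) (some (target_end - ref_start + 1))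
  if target_is_ins then
    let p := pvTrimA (ref.headD "").toList (alt.headD "").toList
    (pvSetHead ref (String.ofList p.1), pvSetHead alt (String.ofList p.2))
  else
    (ref, alt)

-- ===== PORT B =====
-- B's `for c, d in zip(r0, a0): if c != d: break; L += 1` loop.
def pvZipPrefLen : List (Char × Char) → Nat
  | [] => 0
  | (c, d) :: t => if c ≠ d then 0 else pvZipPrefLen t + 1

-- B's insertion branch: index r0 = ref[0], early-return when empty, else index a0 = alt[0],
-- count L over zip and rebuild both lists as [piece[L:]] + rest.
def pvInsB : List String → List String → List String × List String
  | r0 :: refRest, alt =>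
    if r0 = "" then (r0 :: refRest, alt)
    else
      match alt with
      | a0 :: altRest =>
        let L := pvZipPrefLen (r0.toList.zip a0.toList)
        (String.ofList (r0.toList.drop L) :: refRest, String.ofList (a0.toList.drop L) :: altRest)
      | [] => (r0 :: refRest, [])   -- Python B raises IndexError here (alt[0]); outside Pre_
  | [], alt => ([], alt)            -- Python B raises IndexError here (ref[0]); outside Pre_

def getReadRefAlt_alt (ref_aln : List String) (read_aln : List String) (ref_start : Int) (target_is_ins : Bool) (target_start : Int) (target_end : Int) : List String × List String :=
  let lo := target_start - ref_start
  let hi := target_end - ref_start + 1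
  let ref := PySem.List.slice ref_aln (some lo) (some hi)
  let alt := PySem.List.slice read_aln (some lo) (some hi)
  if !target_is_ins then (ref, alt)
  else pvInsB ref alt

-- ===== PRECONDITION & SPEC =====
-- Pre_ excludes exactly the inputs where A raises IndexError in the insertion branch:
-- an empty ref slice, or a nonempty first ref piece together with an empty alt slice
-- (then Python evaluates alt[0]).
def Pre_getReadRefAlt (ref_aln : List String) (read_aln : List String) (ref_start : Int) (target_is_ins : Bool) (target_start : Int) (target_end : Int) : Prop :=
  target_is_ins = true →
    (PySem.List.slice ref_aln (some (target_start - ref_start)) (some (target_end - ref_start + 1)) ≠ [] ∧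
     ((PySem.List.slice ref_aln (some (target_start - ref_start)) (some (target_end - ref_start + 1))).headD "" = "" ∨
      PySem.List.slice read_aln (some (target_start - ref_start)) (some (target_end - ref_start + 1)) ≠ []))
instance (ref_aln : List String) (read_aln : List String) (ref_start : Int) (target_is_ins : Bool) (target_start : Int) (target_end : Int) : Decidable (Pre_getReadRefAlt ref_aln read_aln ref_start target_is_ins target_start target_end) := by unfold Pre_getReadRefAlt; infer_instance

def pvWitness_getReadRefAlt : List String × List String × Int × Bool × Int × Int :=
  (["ACG"], ["AG"], 1, true, 1, 2)

def Spec_getReadRefAlt (ref_aln : List String) (read_aln : List String) (ref_start : Int) (target_is_ins : Bool) (target_start : Int) (target_end : Int) (out : List String × List String) : Prop := out = getReadRefAlt_alt ref_aln read_aln ref_start target_is_ins target_start target_end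
instance (ref_aln : List String) (read_aln : List String) (ref_start : Int) (target_is_ins : Bool) (target_start : Int) (target_end : Int) (out : List String × List String) : Decidable (Spec_getReadRefAlt ref_aln read_aln ref_start target_is_ins target_start target_end out) := by unfold Spec_getReadRefAlt; infer_instance

-- ===== CLAIM (what is proved, stated in full; the proofs are below) =====
def Claim_equal_getReadRefAlt : Prop := ∀ (ref_aln : List String) (read_aln : List String) (ref_start : Int) (target_is_ins : Bool) (target_start : Int) (target_end : Int), Dom_getReadRefAlt ref_aln read_aln ref_start target_is_ins target_start target_end → Pre_getReadRefAlt ref_aln read_aln ref_start target_is_ins target_start target_end → Spec_getReadRefAlt ref_aln read_aln ref_start target_is_ins target_start target_end (getReadRefAlt ref_aln read_aln ref_start target_is_ins target_start target_end)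

-- ===== LEMMAS AND PROOFS =====
-- A's trimming loop = drop B's measured common-prefix length from both strings.
theorem pvTrimA_eq_drop (r a : List Char) :
    pvTrimA r a = (r.drop (pvZipPrefLen (r.zip a)), a.drop (pvZipPrefLen (r.zip a))) := by
  induction r generalizing a with
  | nil => cases a <;> simp [pvTrimA, pvZipPrefLen]
  | cons c r ih =>
    cases a with
    | nil => simp [pvTrimA, pvZipPrefLen]
    | cons d a =>
      by_cases h : d = c
      · simp [pvTrimA, pvZipPrefLen, h, ih]
      · simp [pvTrimA, pvZipPrefLen, h, Ne.symm h]

-- The insertion branch of A equals B's pvInsB on slices admitted by Pre_.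
theorem pvCore (ref alt : List String) (hne : ref ≠ []) (hor : ref.headD "" = "" ∨ alt ≠ []) :
    (pvSetHead ref (String.ofList (pvTrimA (ref.headD "").toList (alt.headD "").toList).1),
     pvSetHead alt (String.ofList (pvTrimA (ref.headD "").toList (alt.headD "").toList).2)) =
    pvInsB ref alt := by
  obtain ⟨r0, refRest, rfl⟩ := List.exists_cons_of_ne_nil hne
  cases alt with
  | nil =>
    have hr0 : r0 = "" := by simpa using hor
    subst hr0
    simp [pvInsB, pvTrimA, pvSetHead]
  | cons a0 altRest =>
    by_cases h0 : r0 = ""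
    · subst h0
      simp [pvInsB, pvTrimA, pvSetHead]
    · simp [pvInsB, pvTrimA_eq_drop, pvSetHead, h0]

-- ===== VERDICT (by name: the statement is the Claim_ definition above) =====
theorem getReadRefAlt_spec : Claim_equal_getReadRefAlt := by
  intro ref_aln read_aln ref_start target_is_ins target_start target_end _ hpre
  unfold Spec_getReadRefAlt
  simp only [getReadRefAlt, getReadRefAlt_alt]
  cases target_is_ins with
  | false => simp
  | true =>
    obtain ⟨hne, hor⟩ := hpre rfl
    simpa using pvCore _ _ hne hor
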